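-- pv_equiv track=rewrite | github.com/Metta-AI/metta | sim/report/data.py | create_eval_hierarchy
-- ===== SOURCE A (Python) =====
-- from typing import Dict, Any, List, Optional
-- from collections import defaultdict
-- from typing import Dict, List, Any, Optional, Set, Tuple
--
-- def create_eval_hierarchy(eval_names: Set[str]) -> Dict[str, List[str]]:
--     """
--     Create a hierarchical structure for evaluations based on path components.
--
--     Args:
--         eval_names: Set of evaluation names
--
--     Returns:
--         Dictionary mapping evaluation categories to lists of evaluation names
--     """
--     hierarchy = defaultdict(list)
--
--     for eval_name in eval_names:
--         # Split by path separator and use first component as category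
--         components = eval_name.split('/')
--         if len(components) > 1:
--             category = components[0]
--         else:
--             category = 'uncategorized'
--
--         hierarchy[category].append(eval_name)
--
--     # Sort evaluations within each category
--     for category in hierarchy:
--         hierarchy[category].sort()
--
--     return dict(hierarchy)
-- ===== SOURCE B (Python) =====
-- def _category(name):
--     components = name.split('/')
--     return components[0] if len(components) > 1 else 'uncategorized'
--
-- def create_eval_hierarchy(eval_names):
--     """Two staged passes: list the distinct categories in first-occurrence
--     order, then build each category's sorted member list by filtering."""
--     order = list(dict.fromkeys(_category(n) for n in eval_names))
--     return {c: sorted(n for n in eval_names if _category(n) == c) for c in order}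
-- ===== Notes on version B (the rewrite author's own statement) =====
-- stated objective: alternative
-- what changed: B replaces A's single grouping pass with mutable per-key appends plus a per-group sort phase by two staged passes: first list the distinct categories in first-occurrence order, then build each group by filtering the input for that category and sorting it once.
import Mathlib
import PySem

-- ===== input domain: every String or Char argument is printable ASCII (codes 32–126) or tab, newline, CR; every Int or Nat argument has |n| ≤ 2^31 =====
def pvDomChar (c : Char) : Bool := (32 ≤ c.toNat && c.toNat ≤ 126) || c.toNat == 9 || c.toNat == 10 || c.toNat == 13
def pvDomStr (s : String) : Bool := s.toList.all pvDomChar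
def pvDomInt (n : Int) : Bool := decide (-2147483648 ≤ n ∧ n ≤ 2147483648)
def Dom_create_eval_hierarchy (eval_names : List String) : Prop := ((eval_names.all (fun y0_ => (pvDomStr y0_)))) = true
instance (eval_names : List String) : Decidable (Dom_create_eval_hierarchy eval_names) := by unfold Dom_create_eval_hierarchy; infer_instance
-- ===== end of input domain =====

-- B builds the result in two staged passes (distinct categories in first-occurrence
-- order, then filter + one sort per category) instead of A's grouping fold with
-- per-key appends followed by a per-group sort phase; same return value (alternative).
-- The Python A/B iterate a set and mutate a local dict; equivalence here is about the return value.

-- ===== PORT A =====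
-- dict as association list: hierarchy[category].append(eval_name) (defaultdict(list))
def updAppend (h : List (String × List String)) (c : String) (n : String) :
    List (String × List String) :=
  match h with
  | [] => [(c, [n])]
  | (k, v) :: rest => if k = c then (k, v ++ [n]) :: rest else (k, v) :: updAppend rest c n

def create_eval_hierarchy (eval_names : List String) : List (String × List String) :=
  let hierarchy := eval_names.foldl (fun h eval_name =>
    let components := (PySem.Str.split? eval_name "/").getD []
    let category := if components.length > 1 then components.headD "" else "uncategorized"
    updAppend h category eval_name) []
  -- for category in hierarchy: hierarchy[category].sort()
  hierarchy.map (fun p => (p.1, PySem.List.sorted p.2 (fun x => x) false))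

-- ===== PORT B =====
-- _category helper of Source B
def catOf (name : String) : String :=
  let components := (PySem.Str.split? name "/").getD []
  if components.length > 1 then components.headD "" else "uncategorized"

-- list(dict.fromkeys(...)) is PySem.List.dedup; the comprehension per category is
-- filter + PySem.List.sorted
def create_eval_hierarchy_alt (eval_names : List String) : List (String × List String) :=
  let order := PySem.List.dedup (eval_names.map catOf)
  order.map (fun c =>
    (c, PySem.List.sorted (eval_names.filter (fun n => catOf n == c)) (fun x => x) false))

-- ===== PRECONDITION & SPEC =====
def Spec_create_eval_hierarchy (eval_names : List String) (out : List (String × List String)) : Prop := out = create_eval_hierarchy_alt eval_names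
instance (eval_names : List String) (out : List (String × List String)) : Decidable (Spec_create_eval_hierarchy eval_names out) := by unfold Spec_create_eval_hierarchy; infer_instance

-- ===== CLAIM (what is proved, stated in full; the proofs are below) =====
def Claim_equal_create_eval_hierarchy : Prop := ∀ (eval_names : List String), Dom_create_eval_hierarchy eval_names → Spec_create_eval_hierarchy eval_names (create_eval_hierarchy eval_names)

-- ===== LEMMAS AND PROOFS =====

-- characterisation of A's grouping fold: keys in first-occurrence order, values filtered
def groupState (es : List String) : List (String × List String) :=
  (PySem.Set.ofList (es.map catOf)).map (fun c => (c, es.filter (fun n => catOf n == c)))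

theorem updAppend_map_of_not_mem (ks : List String) (v : String → List String)
    (c n : String) (hc : c ∉ ks) :
    updAppend (ks.map (fun k => (k, v k))) c n
      = ks.map (fun k => (k, v k)) ++ [(c, [n])] := by
  induction ks with
  | nil => simp [updAppend]
  | cons k ks ih =>
    have hkc : k ≠ c := fun h => hc (h ▸ List.mem_cons_self)
    simp only [List.map_cons, updAppend, if_neg hkc, List.cons_append]
    rw [ih (fun h => hc (List.mem_cons_of_mem _ h))]

theorem updAppend_map_of_mem (ks : List String) (v : String → List String)
    (c n : String) (hnd : ks.Nodup) (hc : c ∈ ks) :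
    updAppend (ks.map (fun k => (k, v k))) c n
      = ks.map (fun k => (k, if k = c then v k ++ [n] else v k)) := by
  induction ks with
  | nil => cases hc
  | cons k ks ih =>
    rcases List.mem_cons.mp hc with rfl | hc'
    · have hcn : c ∉ ks := (List.nodup_cons.mp hnd).1
      simp only [List.map_cons, updAppend, if_pos]
      congr 1
      refine (List.map_congr_left ?_).symm
      intro x hx
      have : x ≠ c := fun h => hcn (h ▸ hx)
      simp [this]
    · have hkc : k ≠ c := fun h => (List.nodup_cons.mp hnd).1 (h ▸ hc')
      simp only [List.map_cons, updAppend, if_neg hkc]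
      rw [ih (List.nodup_cons.mp hnd).2 hc']

theorem groupState_step (es : List String) (n : String) :
    groupState (es ++ [n]) = updAppend (groupState es) (catOf n) n := by
  unfold groupState
  rw [List.map_append, List.map_singleton, PySem.Set.ofList_append_singleton,
      PySem.Set.add_eq_ite]
  have hfil : ∀ c : String, (es ++ [n]).filter (fun x => catOf x == c)
      = es.filter (fun x => catOf x == c) ++ (if catOf n = c then [n] else []) := by
    intro c
    rw [List.filter_append]
    by_cases h : catOf n = c
    · simp [List.filter, h]
    · have hb : (catOf n == c) = false := by simpa using h
      simp [List.filter, hb, h]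
  by_cases hmem : catOf n ∈ PySem.Set.ofList (es.map catOf)
  · rw [if_pos hmem,
      updAppend_map_of_mem _ _ _ _ (PySem.Set.nodup_ofList _) hmem]
    refine List.map_congr_left ?_
    intro c hcmem
    rw [hfil c]
    by_cases h : c = catOf n
    · simp [h]
    · have h' : ¬ catOf n = c := fun hh => h hh.symm
      simp [if_neg h, if_neg h']
  · rw [if_neg hmem,
      updAppend_map_of_not_mem _ _ _ _ hmem, List.map_append]
    congr 1
    · refine List.map_congr_left ?_
      intro c hcmem
      have h' : ¬ catOf n = c := by
        intro hh; exact hmem (hh ▸ hcmem)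
      rw [hfil c, if_neg h', List.append_nil]
    · have hnil : es.filter (fun x => catOf x == catOf n) = [] := by
        refine List.filter_eq_nil_iff.mpr ?_
        intro x hx hbe
        have : catOf n ∈ es.map catOf := by
          have : catOf x = catOf n := by simpa using hbe
          exact this ▸ List.mem_map_of_mem hx
        exact hmem ((PySem.Set.mem_ofList _ _).mpr this)
      simp [hfil, hnil]

theorem foldA_eq_groupState (es : List String) :
    es.foldl (fun h x => updAppend h (catOf x) x) [] = groupState es := by
  induction es using List.reverseRecOn with
  | nil => rfl
  | append_singleton es n ih =>
    rw [List.foldl_append, List.foldl_cons, List.foldl_nil, ih, groupState_step]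

-- ===== VERDICT (by name: the statement is the Claim_ definition above) =====
theorem create_eval_hierarchy_spec : Claim_equal_create_eval_hierarchy := by
  intro eval_names _
  show create_eval_hierarchy eval_names = create_eval_hierarchy_alt eval_names
  unfold create_eval_hierarchy create_eval_hierarchy_alt
  have hfold : eval_names.foldl (fun h eval_name =>
      let components := (PySem.Str.split? eval_name "/").getD []
      let category := if components.length > 1 then components.headD "" else "uncategorized"
      updAppend h category eval_name) []
      = eval_names.foldl (fun h x => updAppend h (catOf x) x) [] := rfl
  rw [hfold, foldA_eq_groupState]
  unfold groupState
  simp [List.map_map, Function.comp]
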